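-- pv_equiv track=rewrite | github.com/Tri334/Naive_Hoax_Covid | main.py | dikategorikan
-- ===== SOURCE A (Python) =====
-- def dikategorikan(berita_cat):
--     categorized = {}
--     for item in berita_cat:
--         if item[0] or item[1]:
--             if item[1] in categorized:
--                 old = categorized[item[1]]
--                 categorized.update({item[1]:old +" "+item[0]})
--             else:
--                 categorized[item[1]] = item[0]
--
--     for key in categorized:
--         tokenize = categorized[key].split(' ')
--         categorized[key]= tokenize
--
--     return categorized
-- ===== SOURCE B (Python) =====
-- def dikategorikan(berita_cat):
--     categorized = {}
--     for item in berita_cat: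
--         if item[0] or item[1]:
--             categorized.setdefault(item[1], []).extend(item[0].split(' '))
--     return categorized
-- ===== Notes on version B (the rewrite author's own statement) =====
-- stated objective: simpler
-- what changed: Single pass that accumulates per-key token lists via setdefault(...).extend(item[0].split(' ')) instead of growing a space-joined string per key and re-splitting every value in a second loop.
import Mathlib
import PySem

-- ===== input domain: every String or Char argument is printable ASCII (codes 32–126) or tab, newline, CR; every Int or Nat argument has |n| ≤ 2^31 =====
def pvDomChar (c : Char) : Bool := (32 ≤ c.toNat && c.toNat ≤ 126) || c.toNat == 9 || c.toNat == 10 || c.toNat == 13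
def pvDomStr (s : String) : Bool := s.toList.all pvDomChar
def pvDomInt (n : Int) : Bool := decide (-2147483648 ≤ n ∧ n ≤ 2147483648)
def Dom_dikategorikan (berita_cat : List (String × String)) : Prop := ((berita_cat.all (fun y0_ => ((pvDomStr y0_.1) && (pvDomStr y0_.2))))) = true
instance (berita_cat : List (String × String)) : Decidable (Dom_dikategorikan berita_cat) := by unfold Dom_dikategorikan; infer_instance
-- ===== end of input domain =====

-- B replaces A's two passes (grow a space-joined string per key, then re-split every value)
-- by one pass that extends a token list per key (objective: simpler).

-- ===== PORT A =====
-- s.split(' '): exact — the separator " " is nonempty, so Chars.splitOn is Python's split here.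
def pvTok (s : String) : List String :=
  (PySem.Chars.splitOn s.toList [' ']).map (fun cs => String.ofList cs)

def dikategorikan (berita_cat : List (String × String)) : List (String × List String) :=
  let d : PySem.Dict String String :=
    berita_cat.foldl (fun d item =>
      if item.1 ≠ "" ∨ item.2 ≠ "" then
        if d.contains item.2 then
          d.insert item.2 (d.getD item.2 "" ++ " " ++ item.1)
        else
          d.insert item.2 item.1
      else d) PySem.Dict.empty
  d.items.map (fun p => (p.1, pvTok p.2))

-- ===== PORT B =====
def dikategorikan_alt (berita_cat : List (String × String)) : List (String × List String) :=
  (berita_cat.foldl (fun d item =>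
      if item.1 ≠ "" ∨ item.2 ≠ "" then
        d.modify item.2 [] (fun v => v ++ pvTok item.1)
      else d) (PySem.Dict.empty : PySem.Dict String (List String))).items

-- ===== PRECONDITION & SPEC =====
def Spec_dikategorikan (berita_cat : List (String × String)) (out : List (String × List String)) : Prop := out = dikategorikan_alt berita_cat
instance (berita_cat : List (String × String)) (out : List (String × List String)) : Decidable (Spec_dikategorikan berita_cat out) := by unfold Spec_dikategorikan; infer_instance

-- ===== CLAIM (what is proved, stated in full; the proofs are below) =====
def Claim_equal_dikategorikan : Prop := ∀ (berita_cat : List (String × String)), Dom_dikategorikan berita_cat → Spec_dikategorikan berita_cat (dikategorikan berita_cat)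

-- ===== LEMMAS AND PROOFS =====

-- A simple structural recursion computing split-on-one-space (cur is the current word, reversed).
def pvMsp : List Char → List Char → List (List Char)
  | pre, [] => [pre.reverse]
  | pre, c :: rest => if c = ' ' then pre.reverse :: pvMsp [] rest else pvMsp (c :: pre) rest

theorem pvGo_spec : ∀ (fuel : Nat) (l cur : List Char) (acc : List (List Char)),
    l.length ≤ fuel →
    PySem.Chars.splitOn.go [' '] fuel l cur acc = acc.reverse ++ pvMsp cur l := by
  intro fuel
  induction fuel with
  | zero =>
      intro l cur acc h
      have : l = [] := List.eq_nil_of_length_eq_zero (Nat.le_zero.mp h)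
      subst this
      simp [PySem.Chars.splitOn.go, pvMsp]
  | succ n ih =>
      intro l cur acc h
      cases l with
      | nil => simp [PySem.Chars.splitOn.go, pvMsp]
      | cons c rest =>
          by_cases hc : c = ' '
          · subst hc
            simp only [PySem.Chars.splitOn.go, List.isPrefixOf, pvMsp]
            simp [ih rest [] (cur.reverse :: acc) (by simpa using h)]
          · simp only [PySem.Chars.splitOn.go, pvMsp, List.isPrefixOf]
            have hb : ((' ' : Char) == c) = false := by simp [BEq.beq]; exact fun h' => hc h'.symm
            simp [hb, hc, ih rest (c :: cur) acc (by simpa using Nat.le_of_succ_le_succ (by simpa using h))]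

theorem splitOn_space_eq_msp (l : List Char) : PySem.Chars.splitOn l [' '] = pvMsp [] l := by
  unfold PySem.Chars.splitOn
  simpa using pvGo_spec (l.length + 1) l [] [] (Nat.le_succ _)

theorem msp_append : ∀ (a : List Char) (pre b : List Char),
    pvMsp pre (a ++ ' ' :: b) = pvMsp pre a ++ pvMsp [] b := by
  intro a
  induction a with
  | nil => intro pre b; simp [pvMsp]
  | cons c a' ih =>
      intro pre b
      by_cases hc : c = ' '
      · subst hc; simp [pvMsp, ih]
      · simp [pvMsp, hc, ih]

theorem pvTok_append (a b : String) : pvTok (a ++ " " ++ b) = pvTok a ++ pvTok b := by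
  unfold pvTok
  rw [String.toList_append, String.toList_append]
  have : (" " : String).toList = [' '] := rfl
  rw [this, List.append_assoc]
  simp only [List.singleton_append, splitOn_space_eq_msp]
  rw [msp_append, List.map_append]

-- lookup transfer along the pointwise-tokenised items relation
theorem get?_rel (dA : PySem.Dict String String) (dB : PySem.Dict String (List String))
    (h : dB.items = dA.items.map (fun p => (p.1, pvTok p.2))) (k : String) :
    dB.get? k = (dA.get? k).map pvTok := by
  simp only [PySem.Dict.get?, h, List.find?_map]
  rcases hf : dA.items.find? (fun p => p.1 == k) with _ | p
  · rw [show (fun p : String × List String => p.1 == k) ∘ (fun p : String × String => (p.1, pvTok p.2)) = (fun p => p.1 == k) from rfl, hf]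
    rfl
  · rw [show (fun p : String × List String => p.1 == k) ∘ (fun p : String × String => (p.1, pvTok p.2)) = (fun p => p.1 == k) from rfl, hf]
    rfl

theorem contains_rel (dA : PySem.Dict String String) (dB : PySem.Dict String (List String))
    (h : dB.items = dA.items.map (fun p => (p.1, pvTok p.2))) (k : String) :
    dB.contains k = dA.contains k := by
  simp only [PySem.Dict.contains, h, List.any_map]
  rfl

theorem step_rel (dA : PySem.Dict String String) (dB : PySem.Dict String (List String))
    (h : dB.items = dA.items.map (fun p => (p.1, pvTok p.2))) (item : String × String) :
    (if item.1 ≠ "" ∨ item.2 ≠ "" then dB.modify item.2 [] (fun v => v ++ pvTok item.1) else dB).items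
      = ((if item.1 ≠ "" ∨ item.2 ≠ "" then
            (if dA.contains item.2 then dA.insert item.2 (dA.getD item.2 "" ++ " " ++ item.1)
             else dA.insert item.2 item.1)
          else dA)).items.map (fun p => (p.1, pvTok p.2)) := by
  by_cases hcond : item.1 ≠ "" ∨ item.2 ≠ ""
  · simp only [if_pos hcond]
    set k := item.2 with hk
    set x := item.1 with hx
    by_cases hc : dA.contains k = true
    · -- key present in both
      rcases hs : dA.get? k with _ | vA
      · exfalso
        have := PySem.Dict.get?_eq_none_iff_contains (d := dA) (k := k)
        rw [hs] at this
        simp [hc] at this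
      · have hgB : dB.get? k = some (pvTok vA) := by
          rw [get?_rel dA dB h k, hs]; rfl
        have hcB : dB.contains k = true := by rw [contains_rel dA dB h k]; exact hc
        rw [PySem.Dict.modify, PySem.Dict.items_insert_of_contains dB _ hcB,
            if_pos hc, PySem.Dict.items_insert_of_contains dA _ hc, h,
            List.map_map, List.map_map]
        apply List.map_congr_left
        intro p _
        by_cases hp : p.1 = k
        · simp [Function.comp, hp, PySem.Dict.getD, hgB, hs, pvTok_append]
        · simp [Function.comp, hp]
    · -- key fresh in both
      have hc' : dA.contains k = false := by simpa using hc
      have hcB : dB.contains k = false := by rw [contains_rel dA dB h k]; exact hc'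
      have hgB : dB.getD k [] = [] := by
        have : dA.get? k = none := by
          rw [PySem.Dict.get?_eq_none_iff_contains, hc']
        simp [PySem.Dict.getD, get?_rel dA dB h k, this]
      rw [PySem.Dict.modify, PySem.Dict.items_insert_of_not_contains dB _ hcB,
          if_neg (by simp [hc']), PySem.Dict.items_insert_of_not_contains dA _ hc', h, hgB]
      simp
  · simp only [if_neg hcond, h]

theorem loop_rel (l : List (String × String)) :
    ∀ (dA : PySem.Dict String String) (dB : PySem.Dict String (List String)),
      dB.items = dA.items.map (fun p => (p.1, pvTok p.2)) →
      (l.foldl (fun d item =>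
          if item.1 ≠ "" ∨ item.2 ≠ "" then d.modify item.2 [] (fun v => v ++ pvTok item.1) else d) dB).items
        = (l.foldl (fun d item =>
            if item.1 ≠ "" ∨ item.2 ≠ "" then
              (if d.contains item.2 then d.insert item.2 (d.getD item.2 "" ++ " " ++ item.1)
               else d.insert item.2 item.1)
            else d) dA).items.map (fun p => (p.1, pvTok p.2)) := by
  induction l with
  | nil => intro dA dB h; simpa using h
  | cons it rest ih =>
      intro dA dB h
      simp only [List.foldl_cons]
      exact ih _ _ (step_rel dA dB h it)

-- ===== VERDICT (by name: the statement is the Claim_ definition above) =====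
theorem dikategorikan_spec : Claim_equal_dikategorikan := by
  intro berita_cat _
  unfold Spec_dikategorikan dikategorikan dikategorikan_alt
  exact (loop_rel berita_cat PySem.Dict.empty PySem.Dict.empty rfl).symm
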